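-- pv_equiv track=rewrite | github.com/Barbara-Lizama/Python_Bootcamp | 18. Data Structures - Dictionary/Coding exercises.py | common_subjects
-- ===== SOURCE A (Python) =====
-- def common_subjects(grade1, grade2, grade3):
--     if not grade1 or not grade2 or not grade3:
--         return set()
--
--     all_grades = [grade1, grade2, grade3]
--     for grade in all_grades:
--         for subjects in grade.values():
--             if not subjects:
--                 return set()
--
--     common_grade1 = set.intersection(*grade1.values())
--     common_grade2 = set.intersection(*grade2.values())
--     common_grade3 = set.intersection(*grade3.values())
--     return common_grade1 & common_grade2 & common_grade3
-- ===== SOURCE B (Python) =====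
-- def common_subjects(grade1, grade2, grade3):
--     if not grade1 or not grade2 or not grade3:
--         return set()
--     value_sets = [subjects for grade in (grade1, grade2, grade3) for subjects in grade.values()]
--     counts = {}
--     for subjects in value_sets:
--         for s in subjects:
--             counts[s] = counts.get(s, 0) + 1
--     n = len(value_sets)
--     return {s for s, c in counts.items() if c == n}
-- ===== Notes on version B (the rewrite author's own statement) =====
-- stated objective: alternative
-- what changed: Replaces A's three per-dict set.intersection calls combined with '&' by a single pass that tallies every subject's frequency across all value-sets in a plain dict and keeps exactly the subjects whose count equals the number of value-sets (the empty-dict guard is kept; the empty-set early return falls out of the threshold for free).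
import Mathlib
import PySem

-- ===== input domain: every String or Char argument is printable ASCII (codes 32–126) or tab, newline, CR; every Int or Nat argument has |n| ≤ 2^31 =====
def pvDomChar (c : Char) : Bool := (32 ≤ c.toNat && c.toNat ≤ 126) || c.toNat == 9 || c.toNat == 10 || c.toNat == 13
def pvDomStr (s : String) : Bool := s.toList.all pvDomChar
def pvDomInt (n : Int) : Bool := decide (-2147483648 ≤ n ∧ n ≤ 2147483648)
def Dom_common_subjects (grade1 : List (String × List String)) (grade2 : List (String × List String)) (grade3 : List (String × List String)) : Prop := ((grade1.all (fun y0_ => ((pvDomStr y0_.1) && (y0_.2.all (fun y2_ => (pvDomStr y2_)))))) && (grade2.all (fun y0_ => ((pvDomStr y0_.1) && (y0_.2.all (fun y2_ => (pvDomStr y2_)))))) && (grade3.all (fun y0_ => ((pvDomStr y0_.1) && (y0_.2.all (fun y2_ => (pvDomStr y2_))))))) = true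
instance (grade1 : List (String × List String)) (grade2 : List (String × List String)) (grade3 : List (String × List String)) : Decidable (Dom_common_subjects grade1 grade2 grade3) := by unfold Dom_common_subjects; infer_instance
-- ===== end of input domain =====

-- B replaces A's three per-dict set.intersection calls plus '&' by one frequency tally over all
-- value-sets with a count == N threshold filter (objective: alternative / idiomatic; same cost).

-- ===== PORT A =====
-- set.intersection(v, *rest): left-to-right '&', keeping the first set's order.
-- The [] case is set.intersection() with no arguments (TypeError); A never reaches it:
-- it only unpacks values() of a dict it has already checked to be non-empty.
def pyIntersectionAll (vs : List (List String)) : List String :=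
  match vs with
  | [] => []
  | v :: rest => rest.foldl PySem.Set.inter v

def common_subjects (grade1 : List (String × List String)) (grade2 : List (String × List String)) (grade3 : List (String × List String)) : List String :=
  if grade1 = [] ∨ grade2 = [] ∨ grade3 = [] then []
  else
    let all_grades := [grade1, grade2, grade3]
    -- 'for grade in all_grades: for subjects in grade.values(): if not subjects: return set()'
    if all_grades.any (fun grade => (PySem.Dict.mk grade).values.any (fun subjects => subjects.isEmpty)) then []
    else
      let common_grade1 := pyIntersectionAll (PySem.Dict.mk grade1).values
      let common_grade2 := pyIntersectionAll (PySem.Dict.mk grade2).values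
      let common_grade3 := pyIntersectionAll (PySem.Dict.mk grade3).values
      PySem.Set.inter (PySem.Set.inter common_grade1 common_grade2) common_grade3

-- ===== PORT B =====
def common_subjects_alt (grade1 : List (String × List String)) (grade2 : List (String × List String)) (grade3 : List (String × List String)) : List String :=
  if grade1 = [] ∨ grade2 = [] ∨ grade3 = [] then []
  else
    let value_sets := [grade1, grade2, grade3].flatMap (fun grade => (PySem.Dict.mk grade).values)
    -- 'for subjects in value_sets: for s in subjects: counts[s] = counts.get(s, 0) + 1'
    let counts := value_sets.foldl (fun d subjects => subjects.foldl (fun d s => d.insert s (d.getD s 0 + 1)) d) (PySem.Dict.empty : PySem.Dict String Int)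
    let n := PySem.List.len value_sets
    -- '{s for s, c in counts.items() if c == n}'
    PySem.Set.ofList ((counts.items.filter (fun p => p.2 == n)).map (fun p => p.1))

-- ===== PRECONDITION & SPEC =====
-- Pre_ states only the representation invariant of the inputs' Python type dict[str, set[str]]:
-- each value list encodes a set, so it holds no duplicate elements (A raises on no input of that type).
def Pre_common_subjects (grade1 : List (String × List String)) (grade2 : List (String × List String)) (grade3 : List (String × List String)) : Prop :=
  ∀ p ∈ grade1 ++ grade2 ++ grade3, (p.2).Nodup
instance (grade1 : List (String × List String)) (grade2 : List (String × List String)) (grade3 : List (String × List String)) : Decidable (Pre_common_subjects grade1 grade2 grade3) := by unfold Pre_common_subjects; infer_instance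

def pvWitness_common_subjects : (List (String × List String)) × (List (String × List String)) × (List (String × List String)) :=
  ([("ann", ["math", "art"])], [("bob", ["math"])], [("cat", ["art", "math"])])

def Spec_common_subjects (grade1 : List (String × List String)) (grade2 : List (String × List String)) (grade3 : List (String × List String)) (out : List String) : Prop := out = common_subjects_alt grade1 grade2 grade3
instance (grade1 : List (String × List String)) (grade2 : List (String × List String)) (grade3 : List (String × List String)) (out : List String) : Decidable (Spec_common_subjects grade1 grade2 grade3 out) := by unfold Spec_common_subjects; infer_instance

-- ===== CLAIM (what is proved, stated in full; the proofs are below) =====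
def Claim_equal_common_subjects : Prop := ∀ (grade1 : List (String × List String)) (grade2 : List (String × List String)) (grade3 : List (String × List String)), Dom_common_subjects grade1 grade2 grade3 → Pre_common_subjects grade1 grade2 grade3 → Spec_common_subjects grade1 grade2 grade3 (common_subjects grade1 grade2 grade3)

-- ===== LEMMAS AND PROOFS =====

-- the canonical predicate both sides filter by: x lies in every list of L
def memAllB (L : List (List String)) (x : String) : Bool := decide (∀ l ∈ L, x ∈ l)

theorem foldl_inter_eq (ls : List (List String)) (v : List String) :
    ls.foldl PySem.Set.inter v = v.filter (memAllB ls) := by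
  induction ls generalizing v with
  | nil => exact (List.filter_eq_self.mpr (fun a _ => by simp [memAllB])).symm
  | cons l ls ih =>
    simp only [List.foldl_cons, ih, PySem.Set.inter, List.filter_filter]
    refine List.filter_congr (fun x _ => ?_)
    by_cases hx : x ∈ l <;> simp [memAllB, hx]

theorem count_flatten (L : List (List String)) (h : ∀ l ∈ L, l.Nodup) (x : String) :
    L.flatten.count x ≤ L.length ∧ (L.flatten.count x = L.length ↔ ∀ l ∈ L, x ∈ l) := by
  induction L with
  | nil => simp
  | cons l L ih =>
    have hl : l.Nodup := h l (by simp)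
    have ih' := ih (fun m hm => h m (by simp [hm]))
    have h1 : l.count x ≤ 1 := List.nodup_iff_count_le_one.mp hl x
    have hpos : 0 < l.count x ↔ x ∈ l := List.count_pos_iff
    simp only [List.flatten_cons, List.count_append, List.length_cons, List.mem_cons]
    constructor
    · omega
    · constructor
      · intro he
        have hx : x ∈ l := hpos.mp (by omega)
        have : L.flatten.count x = L.length := by omega
        exact fun m hm => hm.elim (fun hml => hml ▸ hx) (ih'.2.mp this m)
      · intro hall
        have hx : l.count x = 1 := by
          have := hpos.mpr (hall l (Or.inl rfl)); omega
        have : L.flatten.count x = L.length := ih'.2.mpr (fun m hm => hall m (Or.inr hm))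
        omega

-- B's main branch, reduced to a filter over the deduped flattened subjects
theorem alt_core_eq (L : List (List String)) :
    PySem.Set.ofList (((L.foldl (fun d subjects => subjects.foldl (fun d s => d.insert s (d.getD s 0 + 1)) d) (PySem.Dict.empty : PySem.Dict String Int)).items.filter (fun p => p.2 == PySem.List.len L)).map (fun p => p.1)) =
    (PySem.Set.ofList L.flatten).filter (fun x => L.flatten.count x == L.length) := by
  have h1 : L.foldl (fun d subjects => subjects.foldl (fun d s => d.insert s (d.getD s 0 + 1)) d) (PySem.Dict.empty : PySem.Dict String Int)
      = PySem.Dict.counter L.flatten := by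
    rw [← PySem.Dict.foldl_insert_getD_add_one_eq_counter, List.foldl_flatten]
  rw [h1, PySem.Dict.items_counter, List.filter_map, List.map_map]
  have hcomp : ((fun p : String × Int => p.1) ∘ fun k => (k, (L.flatten.count k : Int))) = id := rfl
  rw [hcomp, List.map_id,
    PySem.Set.ofList_eq_self_of_nodup _ ((PySem.Set.nodup_ofList _).filter _)]
  refine List.filter_congr (fun x _ => ?_)
  simp [PySem.List.len]

theorem filter_memAll_flatten (v0 : List String) (R : List (List String))
    (hv0 : v0.Nodup) (hR : ∀ l ∈ R, l.Nodup) (q : String → Bool)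
    (hq : ∀ x, q x = true ↔ (v0 :: R).flatten.count x = (v0 :: R).length) :
    (PySem.Set.ofList (v0 :: R).flatten).filter q = v0.filter (memAllB R) := by
  have hcnt := count_flatten (v0 :: R) (by
    intro l hl
    rcases List.mem_cons.mp hl with rfl | h
    · exact hv0
    · exact hR l h)
  have hofl : PySem.Set.ofList ((v0 :: R).flatten)
      = v0 ++ (PySem.Set.ofList R.flatten).filter (fun y => !(PySem.Set.contains v0 y)) := by
    have : (v0 :: R).flatten = v0 ++ R.flatten := by simp
    rw [this, PySem.Set.ofList_append, PySem.Set.update_eq_append_filter,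
        PySem.Set.ofList_eq_self_of_nodup _ hv0]
  rw [hofl, List.filter_append]
  have hrest : ((PySem.Set.ofList R.flatten).filter (fun y => !(PySem.Set.contains v0 y))).filter q = [] := by
    rw [List.filter_eq_nil_iff]
    intro x hx
    have hnv0 : x ∉ v0 := by
      have := (List.mem_filter.mp hx).2
      simpa [PySem.Set.contains_iff] using this
    intro hqx
    exact hnv0 (((hcnt x).2.mp ((hq x).mp hqx)) v0 (by simp))
  rw [hrest, List.append_nil]
  refine List.filter_congr (fun x hxv0 => ?_)
  have : (q x = true) ↔ (memAllB R x = true) := by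
    rw [hq x, (hcnt x).2, memAllB, decide_eq_true_iff]
    constructor
    · intro h l hl; exact h l (by simp [hl])
    · intro h l hl; rcases (List.mem_cons.mp hl) with h' | h'
      · exact h' ▸ hxv0
      · exact h l h'
  exact Bool.eq_iff_iff.mpr this

-- ===== VERDICT (by name: the statement is the Claim_ definition above) =====
theorem common_subjects_spec : Claim_equal_common_subjects := by
  intro g1 g2 g3 _hDom hPre
  unfold Spec_common_subjects common_subjects common_subjects_alt
  by_cases hempty : g1 = [] ∨ g2 = [] ∨ g3 = []
  · simp [hempty]
  · simp only [if_neg hempty]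
    -- the three value-set lists
    obtain ⟨p1, t1, hg1⟩ : ∃ p t, g1 = p :: t := by
      cases g1 with
      | nil => exact absurd (Or.inl rfl) hempty
      | cons p t => exact ⟨p, t, rfl⟩
    set L : List (List String) := [g1, g2, g3].flatMap (fun grade => (PySem.Dict.mk grade).values) with hL
    have hLnodup : ∀ l ∈ L, l.Nodup := by
      intro l hl
      rw [hL] at hl
      simp only [List.mem_flatMap, List.mem_cons, List.not_mem_nil, or_false,
        PySem.Dict.values_mk, List.mem_map] at hl
      obtain ⟨g, hg, p, hp, rfl⟩ := hl
      rcases hg with rfl | rfl | rfl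
      · exact hPre p (by simp [hp])
      · exact hPre p (by simp [hp])
      · exact hPre p (by simp [hp])
    have hcnt := count_flatten L hLnodup
    by_cases hzero : [g1, g2, g3].any (fun grade => (PySem.Dict.mk grade).values.any (fun subjects => subjects.isEmpty))
    · -- A returns set(); B's threshold filter is empty too
      rw [if_pos hzero]
      obtain ⟨l0, hl0, hl0e⟩ : ∃ l ∈ L, l = [] := by
        simp only [List.any_eq_true, List.isEmpty_iff] at hzero
        obtain ⟨g, hg, s, hs, hse⟩ := hzero
        refine ⟨s, ?_, hse⟩
        rw [hL]
        exact List.mem_flatMap.mpr ⟨g, hg, hs⟩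
      rw [alt_core_eq L]
      have : (PySem.Set.ofList L.flatten).filter (fun x => L.flatten.count x == L.length) = [] := by
        rw [List.filter_eq_nil_iff]
        intro x _ hx
        have := (hcnt x).2.mp (by simpa using hx) l0 hl0
        simp [hl0e] at this
      rw [this]
    · rw [if_neg hzero]
      -- A's side: nested intersections = one filter over the head value-set
      have hv1 : (PySem.Dict.mk g1).values = p1.2 :: t1.map (fun x => x.2) := by
        simp [hg1]
      obtain ⟨v2, r2, hv2⟩ : ∃ v r, (PySem.Dict.mk g2).values = v :: r := by
        cases g2 with
        | nil => exact absurd (Or.inr (Or.inl rfl)) hempty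
        | cons p t => exact ⟨p.2, t.map (fun x => x.2), by simp⟩
      obtain ⟨v3, r3, hv3⟩ : ∃ v r, (PySem.Dict.mk g3).values = v :: r := by
        cases g3 with
        | nil => exact absurd (Or.inr (Or.inr rfl)) hempty
        | cons p t => exact ⟨p.2, t.map (fun x => x.2), by simp⟩
      have hLdecomp : L = p1.2 :: (t1.map (fun x => x.2) ++ ((v2 :: r2) ++ (v3 :: r3))) := by
        have h2 : g2.map (fun x => x.2) = v2 :: r2 := by simpa using hv2
        have h3 : g3.map (fun x => x.2) = v3 :: r3 := by simpa using hv3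
        simp [hL, List.flatMap, hg1, h2, h3]
      have hAside :
          PySem.Set.inter (PySem.Set.inter (pyIntersectionAll (PySem.Dict.mk g1).values) (pyIntersectionAll (PySem.Dict.mk g2).values)) (pyIntersectionAll (PySem.Dict.mk g3).values)
          = p1.2.filter (memAllB (t1.map (fun x => x.2) ++ ((v2 :: r2) ++ (v3 :: r3)))) := by
        rw [hv1, hv2, hv3]
        simp only [pyIntersectionAll, foldl_inter_eq]
        simp only [PySem.Set.inter, List.filter_filter]
        refine List.filter_congr (fun x hx => ?_)
        apply Bool.eq_iff_iff.mpr
        simp only [Bool.and_eq_true, PySem.Set.contains_eq_listContains, List.contains_iff_mem,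
          List.mem_filter, memAllB, decide_eq_true_iff, List.mem_append, List.mem_cons]
        constructor
        · rintro ⟨⟨hx3, h3⟩, ⟨hx2, h2⟩, h1⟩ l hl
          rcases hl with h | (h | h)
          · exact h1 l h
          · rcases h with rfl | h
            · exact hx2
            · exact h2 l h
          · rcases h with rfl | h
            · exact hx3
            · exact h3 l h
        · intro hall
          exact ⟨⟨hall v3 (Or.inr (Or.inr (Or.inl rfl))), fun l hl => hall l (Or.inr (Or.inr (Or.inr hl)))⟩,
            ⟨hall v2 (Or.inr (Or.inl (Or.inl rfl))), fun l hl => hall l (Or.inr (Or.inl (Or.inr hl)))⟩,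
            fun l hl => hall l (Or.inl hl)⟩
      rw [hAside, alt_core_eq L, hLdecomp]
      exact (filter_memAll_flatten p1.2 _ (hPre p1 (by simp [hg1]))
        (fun l hl => hLnodup l (by rw [hLdecomp]; exact List.mem_cons_of_mem _ hl))
        _ (fun x => by simp)).symm
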